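-- pv_equiv track=rewrite | github.com/CalvyPZ/userscripts | languagepages.py | replace_model_icon
-- ===== SOURCE A (Python) =====
-- def replace_model_icon(old_text, new_text):
--     def get_line_value(text, key):
--         for line in text.splitlines():
--             if line.startswith(key):
--                 return line
--         return None
--
--     # Extract the model and icon lines from the old text
--     old_model_line = get_line_value(old_text, "|model=")
--     old_icon_line = get_line_value(old_text, "|icon=")
--
--     new_text_lines = new_text.splitlines()
--
--     # Only replace the model line if it exists in the old text
--     if old_model_line:
--         new_text_lines = [
--             old_model_line if line.startswith("|model=") else line
--             for line in new_text_lines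
--         ]
--     else:
--         # If no model is found in the old text, remove the model line from the new text
--         new_text_lines = [
--             line for line in new_text_lines if not line.startswith("|model=")
--         ]
--
--     # Always replace the icon line if found in the old text
--     if old_icon_line:
--         new_text_lines = [
--             old_icon_line if line.startswith("|icon=") else line
--             for line in new_text_lines
--         ]
--
--     return "\n".join(new_text_lines)
-- ===== SOURCE B (Python) =====
-- def replace_model_icon(old_text, new_text):
--     # One scan of old_text collecting the first model/icon lines, then one
--     # branching pass over new_text's lines building the output list directly.
--     model = None
--     icon = None
--     for line in old_text.splitlines():
--         if model is None and line.startswith("|model="):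
--             model = line
--         if icon is None and line.startswith("|icon="):
--             icon = line
--     out = []
--     for line in new_text.splitlines():
--         if line.startswith("|model="):
--             if model is not None:
--                 out.append(model)
--         elif line.startswith("|icon=") and icon is not None:
--             out.append(icon)
--         else:
--             out.append(line)
--     return "\n".join(out)
-- ===== Notes on version B (the rewrite author's own statement) =====
-- stated objective: alternative
-- what changed: Replaces A's repeated splitlines scans and two-to-three sequential list comprehensions with one scan of old_text collecting both lines and a single branching pass over new_text that substitutes, drops or keeps each line.
import Mathlib
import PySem

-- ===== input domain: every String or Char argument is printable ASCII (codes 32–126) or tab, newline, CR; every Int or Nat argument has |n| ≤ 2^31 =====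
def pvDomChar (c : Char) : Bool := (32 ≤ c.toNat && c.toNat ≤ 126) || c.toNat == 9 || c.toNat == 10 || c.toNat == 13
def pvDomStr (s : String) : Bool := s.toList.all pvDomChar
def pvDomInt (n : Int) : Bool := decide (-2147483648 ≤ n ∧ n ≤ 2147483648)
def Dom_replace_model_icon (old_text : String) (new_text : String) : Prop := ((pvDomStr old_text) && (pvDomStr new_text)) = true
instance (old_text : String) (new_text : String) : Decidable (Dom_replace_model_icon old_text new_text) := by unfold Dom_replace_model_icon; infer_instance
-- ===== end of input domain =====

-- ===== PORT A =====
-- B differs from A by decomposition: one scan of old_text for both lines, one branching pass over new_text (same cost; 'alternative').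
def pvFindLine (key : String) : List String → Option String
  | [] => none
  | l :: ls => if PySem.Str.startswith l key then some l else pvFindLine key ls

-- Python truthiness of an Optional[str]
def pvTruthy : Option String → Bool
  | none => false
  | some s => s ≠ ""

def replace_model_icon (old_text : String) (new_text : String) : String :=
  let oldModel := pvFindLine "|model=" (PySem.Str.splitlines old_text)
  let oldIcon := pvFindLine "|icon=" (PySem.Str.splitlines old_text)
  let ls0 := PySem.Str.splitlines new_text
  let ls1 :=
    if pvTruthy oldModel then
      ls0.map (fun l => if PySem.Str.startswith l "|model=" then oldModel.getD "" else l)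
    else
      ls0.filter (fun l => !(PySem.Str.startswith l "|model="))
  let ls2 :=
    if pvTruthy oldIcon then
      ls1.map (fun l => if PySem.Str.startswith l "|icon=" then oldIcon.getD "" else l)
    else ls1
  PySem.Str.join "\n" ls2

-- ===== PORT B =====
def pvScan : List String → Option String → Option String → Option String × Option String
  | [], m, i => (m, i)
  | l :: ls, m, i =>
    let m' := if m.isNone && PySem.Str.startswith l "|model=" then some l else m
    let i' := if i.isNone && PySem.Str.startswith l "|icon=" then some l else i
    pvScan ls m' i'

def pvEmit (m i : Option String) : List String → List String
  | [] => []
  | l :: ls =>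
    if PySem.Str.startswith l "|model=" then
      match m with
      | some s => s :: pvEmit m i ls
      | none => pvEmit m i ls
    else if PySem.Str.startswith l "|icon=" && i.isSome then
      i.getD "" :: pvEmit m i ls
    else
      l :: pvEmit m i ls

def replace_model_icon_alt (old_text : String) (new_text : String) : String :=
  let mi := pvScan (PySem.Str.splitlines old_text) none none
  PySem.Str.join "\n" (pvEmit mi.1 mi.2 (PySem.Str.splitlines new_text))

-- ===== PRECONDITION & SPEC =====
def Spec_replace_model_icon (old_text : String) (new_text : String) (out : String) : Prop := out = replace_model_icon_alt old_text new_text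
instance (old_text : String) (new_text : String) (out : String) : Decidable (Spec_replace_model_icon old_text new_text out) := by unfold Spec_replace_model_icon; infer_instance

-- ===== CLAIM (what is proved, stated in full; the proofs are below) =====
def Claim_equal_replace_model_icon : Prop := ∀ (old_text : String) (new_text : String), Dom_replace_model_icon old_text new_text → Spec_replace_model_icon old_text new_text (replace_model_icon old_text new_text)

-- ===== LEMMAS AND PROOFS =====

lemma findLine_startswith (key : String) : ∀ (ls : List String) (s : String),
    pvFindLine key ls = some s → PySem.Str.startswith s key = true := by
  intro ls
  induction ls with
  | nil => intro s h; simp [pvFindLine] at h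
  | cons l ls ih =>
    intro s h
    unfold pvFindLine at h
    by_cases hl : PySem.Str.startswith l key = true
    · rw [if_pos hl] at h
      cases h
      exact hl
    · rw [if_neg hl] at h
      exact ih s h

lemma scan_eq : ∀ (ls : List String) (m i : Option String),
    pvScan ls m i = ((match m with | some s => some s | none => pvFindLine "|model=" ls),
                     (match i with | some t => some t | none => pvFindLine "|icon=" ls)) := by
  intro ls
  induction ls with
  | nil => intro m i; cases m <;> cases i <;> simp [pvScan, pvFindLine]
  | cons l ls ih =>
    intro m i
    cases m <;> cases i <;>
      simp only [pvScan, Option.isNone, Bool.true_and, Bool.false_and, ih, pvFindLine] <;> split_ifs <;> simp_all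

lemma sw_nonempty (l key : String) (hk : key ≠ "")
    (h : PySem.Str.startswith l key = true) : l ≠ "" := by
  have h' := h
  rw [PySem.Str.startswith_eq, PySem.Chars.startswith_iff] at h'
  intro hl
  subst hl
  have : key.toList = [] := List.prefix_nil.mp (by simpa using h')
  exact hk (by cases key; simp_all)

lemma sw_model_not_icon (l : String)
    (h : PySem.Str.startswith l "|model=" = true) :
    PySem.Str.startswith l "|icon=" = false := by
  rw [PySem.Str.startswith_eq, PySem.Chars.startswith_iff] at h
  obtain ⟨r, hr⟩ := h
  rw [PySem.Str.startswith_eq]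
  apply Bool.eq_false_iff.mpr
  intro hc
  rw [PySem.Chars.startswith_iff] at hc
  obtain ⟨r2, hr2⟩ := hc
  rw [← hr] at hr2
  simp at hr2

lemma emit_some_some (s t : String)
    (hs : PySem.Str.startswith s "|model=" = true) :
    ∀ ls, pvEmit (some s) (some t) ls =
      (ls.map (fun l => if PySem.Str.startswith l "|model=" then s else l)).map
        (fun l => if PySem.Str.startswith l "|icon=" then t else l) := by
  intro ls
  induction ls with
  | nil => simp [pvEmit]
  | cons l ls ih =>
    have hnot := sw_model_not_icon s hs
    by_cases h1 : PySem.Str.startswith l "|model=" = true <;>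
      by_cases h2 : PySem.Str.startswith l "|icon=" = true <;>
      simp at h1 h2 hnot <;>
      simp [pvEmit, h1, h2, hnot, ih]

lemma emit_some_none (s : String) :
    ∀ ls, pvEmit (some s) none ls =
      ls.map (fun l => if PySem.Str.startswith l "|model=" then s else l) := by
  intro ls
  induction ls with
  | nil => simp [pvEmit]
  | cons l ls ih =>
    by_cases h1 : PySem.Str.startswith l "|model=" = true <;>
      simp at h1 <;>
      simp [pvEmit, h1, ih]

lemma emit_none_some (t : String) :
    ∀ ls, pvEmit none (some t) ls =
      (ls.filter (fun l => !(PySem.Str.startswith l "|model="))).map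
        (fun l => if PySem.Str.startswith l "|icon=" then t else l) := by
  intro ls
  induction ls with
  | nil => simp [pvEmit]
  | cons l ls ih =>
    by_cases h1 : PySem.Str.startswith l "|model=" = true
    · simp at h1
      simp [pvEmit, h1, ih]
    · by_cases h2 : PySem.Str.startswith l "|icon=" = true <;>
        simp at h1 h2 <;>
        simp [pvEmit, h1, h2, ih]

lemma emit_none_none :
    ∀ ls, pvEmit none none ls =
      ls.filter (fun l => !(PySem.Str.startswith l "|model="))  := by
  intro ls
  induction ls with
  | nil => simp [pvEmit]
  | cons l ls ih =>
    by_cases h1 : PySem.Str.startswith l "|model=" = true <;>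
      simp at h1 <;>
      simp [pvEmit, h1, ih]

-- ===== VERDICT (by name: the statement is the Claim_ definition above) =====
theorem replace_model_icon_spec : Claim_equal_replace_model_icon := by
  intro old_text new_text _
  unfold Spec_replace_model_icon replace_model_icon replace_model_icon_alt
  rw [scan_eq]
  cases hm : pvFindLine "|model=" (PySem.Str.splitlines old_text) with
  | some s =>
    have hs := findLine_startswith _ _ _ hm
    have hsne : s ≠ "" := sw_nonempty s "|model=" (by decide) hs
    cases hi : pvFindLine "|icon=" (PySem.Str.splitlines old_text) with
    | some t =>
      have ht := findLine_startswith _ _ _ hi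
      have htne : t ≠ "" := sw_nonempty t "|icon=" (by decide) ht
      simp [pvTruthy, hsne, htne, emit_some_some s t hs]
      rfl
    | none =>
      simp [pvTruthy, hsne, emit_some_none s]
      rfl
  | none =>
    cases hi : pvFindLine "|icon=" (PySem.Str.splitlines old_text) with
    | some t =>
      have ht := findLine_startswith _ _ _ hi
      have htne : t ≠ "" := sw_nonempty t "|icon=" (by decide) ht
      simp [pvTruthy, htne, emit_none_some t]
      rfl
    | none =>
      simp [pvTruthy, emit_none_none]
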